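-- pv_equiv track=rewrite | github.com/mahaasur13-sys/pop-os-setup | atomos_pkg/atomos/runtime/raft_hardener.py | assert_single_leader
-- ===== SOURCE A (Python) =====
-- from typing import Dict, List, Optional, Set
--
-- def assert_single_leader(claims: Dict[str, int]) -> tuple[bool, Optional[str]]:
--     """
--     Given dict of node_id -> term claims, detect split-brain.
--     Returns (is_unique, leader_or_none).
--     Only one node may claim leadership per term.
--     """
--     if not claims:
--         return True, None
--
--     # Find max term
--     max_term = max(claims.values())
--     claimants = {nid for nid, term in claims.items() if term == max_term}
--
--     if len(claimants) > 1:
--         # Split brain — select lexicographically smallest as tiebreaker (deterministic)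
--         return False, sorted(claimants)[0]
--
--     return True, list(claimants)[0] if claimants else None
-- ===== SOURCE B (Python) =====
-- from typing import Dict, Optional
--
-- def assert_single_leader(claims: Dict[str, int]) -> tuple[bool, Optional[str]]:
--     # Single pass: carry (max_term, count_at_max, lex-smallest claimant at max).
--     best = None
--     for nid, term in claims.items():
--         if best is None or term > best[0]:
--             best = (term, 1, nid)
--         elif term == best[0]:
--             best = (term, best[1] + 1, min(best[2], nid))
--     if best is None:
--         return True, None
--     return best[1] <= 1, best[2]
-- ===== Notes on version B (the rewrite author's own statement) =====
-- stated objective: alternative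
-- what changed: Replaced A's two scans over the dict (max of values, then a set comprehension collecting claimants) plus a sort for tie-breaking by one accumulator pass that maintains (max term, count at max, lexicographically smallest claimant); the sort disappears entirely.
import Mathlib
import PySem

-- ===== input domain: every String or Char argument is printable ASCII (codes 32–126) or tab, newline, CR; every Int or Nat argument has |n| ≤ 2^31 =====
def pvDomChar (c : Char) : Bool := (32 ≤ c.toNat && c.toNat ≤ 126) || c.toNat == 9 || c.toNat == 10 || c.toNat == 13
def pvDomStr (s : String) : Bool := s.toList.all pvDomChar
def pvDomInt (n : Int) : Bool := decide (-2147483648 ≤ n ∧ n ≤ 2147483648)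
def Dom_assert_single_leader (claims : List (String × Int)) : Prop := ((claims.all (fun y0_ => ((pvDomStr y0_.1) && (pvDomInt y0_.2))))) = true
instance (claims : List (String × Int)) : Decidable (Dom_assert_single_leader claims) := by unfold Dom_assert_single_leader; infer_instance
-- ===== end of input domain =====

-- B replaces A's two scans (max, then set-comprehension) plus a sort by one accumulator pass
-- keeping (max term, count at max, lexicographically smallest claimant); same return value.

-- ===== PORT A =====
-- Python's '<' on strings (code-point order), as a kernel-computable Decidable instance
def strDecLT (a b : String) : Decidable (a < b) :=
  decidable_of_iff (a.toList < b.toList) String.lt_iff_toList_lt.symm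

def assert_single_leader (claims : List (String × Int)) : Bool × Option String :=
  if claims = [] then (true, none)
  else
    -- max(claims.values()); claims ≠ [] here, so max? = some …; the .getD 0 default is unreachable
    let max_term : Int := (PySem.List.max? (claims.map Prod.snd) (fun t => t)).getD 0
    -- {nid for nid, term in claims.items() if term == max_term}
    let claimants : PySem.Set String :=
      PySem.Set.ofList ((claims.filter (fun p => p.2 == max_term)).map Prod.fst)
    if 1 < PySem.Set.len claimants then
      -- sorted(claimants)[0]; claimants ≠ [] in this branch, so head? = some …
      (false, (@PySem.List.sorted String String String.LT' strDecLT claimants (fun x => x) false).head?)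
    else
      -- list(claimants)[0] if claimants else None
      (true, if claimants = [] then none else claimants.head?)

-- ===== PORT B =====
-- Python's min(l, n) on two strings, by code-point comparison (first argument on ties);
-- compared via toList because Lean's own String order does not reduce in the kernel
def strMin (l n : String) : String := if n.toList < l.toList then n else l

-- one fold step: state = none before the first claim, else some (max_term, count, leader)
def altStep (s : Option (Int × Int × String)) (p : String × Int) : Option (Int × Int × String) :=
  match s with
  | none => some (p.2, 1, p.1)
  | some (m, c, l) =>
    if m < p.2 then some (p.2, 1, p.1)
    else if p.2 = m then some (m, c + 1, strMin l p.1)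
    else some (m, c, l)

def assert_single_leader_alt (claims : List (String × Int)) : Bool × Option String :=
  match claims.foldl altStep none with
  | none => (true, none)
  | some (_, c, l) => (decide (c ≤ 1), some l)

-- ===== PRECONDITION & SPEC =====
-- A's argument is a Python dict, whose keys are necessarily distinct; Pre_ states exactly
-- that the association list has no duplicate keys (every dict input satisfies it).
def Pre_assert_single_leader (claims : List (String × Int)) : Prop :=
  (claims.map Prod.fst).Nodup
instance (claims : List (String × Int)) : Decidable (Pre_assert_single_leader claims) := by
  unfold Pre_assert_single_leader; infer_instance

def pvWitness_assert_single_leader : (List (String × Int)) := [("a", 1), ("b", 2)]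

def Spec_assert_single_leader (claims : List (String × Int)) (out : Bool × Option String) : Prop := out = assert_single_leader_alt claims
instance (claims : List (String × Int)) (out : Bool × Option String) : Decidable (Spec_assert_single_leader claims out) := by unfold Spec_assert_single_leader; infer_instance

-- ===== CLAIM (what is proved, stated in full; the proofs are below) =====
def Claim_equal_assert_single_leader : Prop := ∀ (claims : List (String × Int)), Dom_assert_single_leader claims → Pre_assert_single_leader claims → Spec_assert_single_leader claims (assert_single_leader claims)

-- ===== LEMMAS AND PROOFS =====

-- the value B's fold reaches, described by A-side primitives
def specState (l : List (String × Int)) : Option (Int × Int × String) :=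
  match PySem.List.max? (l.map Prod.snd) (fun t => t) with
  | none => none
  | some M =>
    match PySem.List.min? ((l.filter (fun p => p.2 == M)).map Prod.fst) (fun x => x) with
    | none => none
    | some ld => some (M, (((l.filter (fun p => p.2 == M)).map Prod.fst).length : Int), ld)

theorem pymax_id_eq_some_iff {α : Type} [LinearOrder α] (xs : List α) (m : α) :
    PySem.List.max? xs (fun x => x) = some m ↔ m ∈ xs ∧ ∀ y ∈ xs, y ≤ m := by
  constructor
  · intro h
    exact ⟨PySem.List.max?_mem h, PySem.List.max?_isMax h⟩
  · rintro ⟨hm, hmax⟩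
    cases h : PySem.List.max? xs (fun x => x) with
    | none => rw [PySem.List.max?_eq_none_iff] at h; simp [h] at hm
    | some m' =>
      have h1 := PySem.List.max?_isMax h m hm
      have h2 := hmax m' (PySem.List.max?_mem h)
      simp only [le_antisymm h1 h2]

theorem pymin_id_eq_some_iff {α : Type} [LinearOrder α] (xs : List α) (m : α) :
    PySem.List.min? xs (fun x => x) = some m ↔ m ∈ xs ∧ ∀ y ∈ xs, m ≤ y := by
  constructor
  · intro h
    exact ⟨PySem.List.min?_mem h, PySem.List.min?_isMin h⟩
  · rintro ⟨hm, hmin⟩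
    cases h : PySem.List.min? xs (fun x => x) with
    | none => rw [PySem.List.min?_eq_none_iff] at h; simp [h] at hm
    | some m' =>
      have h1 := PySem.List.min?_isMin h m hm
      have h2 := hmin m' (PySem.List.min?_mem h)
      simp only [le_antisymm h2 h1]



theorem strMin_eq_min (l n : String) : strMin l n = min l n := by
  rcases lt_or_ge n l with h | h
  · rw [strMin, if_pos (String.lt_iff_toList_lt.mp h), min_eq_right h.le]
  · rw [strMin, if_neg (fun hc => absurd (String.lt_iff_toList_lt.mpr hc) (not_lt.mpr h)),
      min_eq_left h]

theorem foldl_altStep_eq_specState (l : List (String × Int)) :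
    l.foldl altStep none = specState l := by
  induction l using List.reverseRecOn with
  | nil => rfl
  | append_singleton l p ih =>
    rw [List.foldl_append, ih]
    cases hM : PySem.List.max? (l.map Prod.snd) (fun t => t) with
    | none =>
      have hl : l = [] := by
        have := (PySem.List.max?_eq_none_iff _ _).mp hM
        simpa using this
      subst hl
      have h1 : PySem.List.max? [p.2] (fun t : Int => t) = some p.2 :=
        (pymax_id_eq_some_iff _ _).mpr (by simp)
      have h2 : PySem.List.min? [p.1] (fun x : String => x) = some p.1 :=
        (pymin_id_eq_some_iff _ _).mpr (by simp)
      simp only [List.map_nil] at hM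
      simp [specState, altStep, h1, h2, hM]
    | some M =>
      have hub : ∀ y ∈ l.map Prod.snd, y ≤ M := PySem.List.max?_isMax hM
      have hMm : M ∈ l.map Prod.snd := PySem.List.max?_mem hM
      have hFne : ((l.filter (fun q => q.2 == M)).map Prod.fst) ≠ [] := by
        obtain ⟨q, hq, hq2⟩ := List.mem_map.mp hMm
        have : q ∈ l.filter (fun q => q.2 == M) :=
          List.mem_filter.mpr ⟨hq, by simp [hq2]⟩
        intro hnil
        rcases List.map_eq_nil_iff.mp hnil with h
        simp [h] at this
      obtain ⟨ld, hld⟩ : ∃ ld, PySem.List.min?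
          ((l.filter (fun q => q.2 == M)).map Prod.fst) (fun x => x) = some ld := by
        cases h : PySem.List.min? ((l.filter (fun q => q.2 == M)).map Prod.fst) (fun x => x) with
        | none => exact absurd ((PySem.List.min?_eq_none_iff _ _).mp h) hFne
        | some ld => exact ⟨ld, rfl⟩
      have hldmem := PySem.List.min?_mem hld
      have hldmin := PySem.List.min?_isMin hld
      have hspec : specState l
          = some (M, (((l.filter (fun q => q.2 == M)).map Prod.fst).length : Int), ld) := by
        simp only [specState, hM, hld]
      rw [hspec]
      rcases lt_trichotomy M p.2 with h | h | h
      · -- strictly larger term: reset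
        have hmax : PySem.List.max? ((l ++ [p]).map Prod.snd) (fun t => t) = some p.2 := by
          refine (pymax_id_eq_some_iff _ _).mpr ⟨by simp, ?_⟩
          intro y hy
          rcases List.mem_map.mp hy with ⟨q, hq, rfl⟩
          rcases List.mem_append.mp hq with hq | hq
          · exact le_of_lt (lt_of_le_of_lt (hub _ (List.mem_map_of_mem hq)) h)
          · simp at hq; rw [hq]
        have hfilt : (l ++ [p]).filter (fun q => q.2 == p.2) = [p] := by
          rw [List.filter_append]
          have : l.filter (fun q => q.2 == p.2) = [] := by
            refine List.filter_eq_nil_iff.mpr ?_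
            intro q hq
            have := hub _ (List.mem_map_of_mem hq)
            simp; omega
          simp [this]
        have hminp : PySem.List.min? [p.1] (fun x : String => x) = some p.1 :=
          (pymin_id_eq_some_iff _ _).mpr (by simp)
        simp only [specState, hmax, hfilt]
        simp [altStep, h, hminp]
      · -- equal term: count +1, keep lexicographic min
        have hmax : PySem.List.max? ((l ++ [p]).map Prod.snd) (fun t => t) = some M := by
          refine (pymax_id_eq_some_iff _ _).mpr
            ⟨by rw [List.map_append]; exact List.mem_append.mpr (Or.inl hMm), ?_⟩
          intro y hy
          rcases List.mem_map.mp hy with ⟨q, hq, rfl⟩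
          rcases List.mem_append.mp hq with hq | hq
          · exact hub _ (List.mem_map_of_mem hq)
          · simp at hq; rw [hq, ← h]
        have hfilt : (l ++ [p]).filter (fun q => q.2 == M)
            = l.filter (fun q => q.2 == M) ++ [p] := by
          rw [List.filter_append]
          simp [← h]
        have hmin : PySem.List.min?
            ((l.filter (fun q => q.2 == M)).map Prod.fst ++ [p.1])
            (fun x => x) = some (min ld p.1) := by
          refine (pymin_id_eq_some_iff _ _).mpr ⟨?_, ?_⟩
          · rcases le_total ld p.1 with hle | hle
            · rw [min_eq_left hle]
              exact List.mem_append.mpr (Or.inl hldmem)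
            · simp [min_eq_right hle]
          · intro y hy
            rcases List.mem_append.mp hy with hy | hy
            · exact le_trans (min_le_left _ _) (hldmin _ hy)
            · simp at hy; rw [hy]; exact min_le_right _ _
        have hnlt : ¬ M < p.2 := by omega
        have heq : p.2 = M := h.symm
        simp only [specState, hmax, hfilt]
        simp [altStep, heq, hmin, strMin_eq_min]
        try omega
      · -- strictly smaller term: unchanged
        have hmax : PySem.List.max? ((l ++ [p]).map Prod.snd) (fun t => t) = some M := by
          refine (pymax_id_eq_some_iff _ _).mpr
            ⟨by rw [List.map_append]; exact List.mem_append.mpr (Or.inl hMm), ?_⟩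
          intro y hy
          rcases List.mem_map.mp hy with ⟨q, hq, rfl⟩
          rcases List.mem_append.mp hq with hq | hq
          · exact hub _ (List.mem_map_of_mem hq)
          · simp at hq; rw [hq]; exact le_of_lt h
        have hfilt : (l ++ [p]).filter (fun q => q.2 == M) = l.filter (fun q => q.2 == M) := by
          rw [List.filter_append]
          have : p.2 ≠ M := by omega
          simp [this]
        have hnlt : ¬ M < p.2 := by omega
        have hne : p.2 ≠ M := by omega
        simp only [specState, hmax, hfilt, hld]
        simp [altStep, hnlt, hne]

theorem foldl_add_of_nodup (xs s : List String) (h : (s ++ xs).Nodup) :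
    xs.foldl PySem.Set.add s = s ++ xs := by
  induction xs generalizing s with
  | nil => simp
  | cons x t ih =>
    have hx : x ∉ s := fun hxs => (List.disjoint_of_nodup_append h) hxs (by simp)
    have hadd : PySem.Set.add s x = s ++ [x] := by
      simp [PySem.Set.add, PySem.Set.contains, hx]
    rw [List.foldl_cons, hadd, ih (s ++ [x]) (by simpa using h)]
    simp

theorem ofList_eq_self_of_nodup (xs : List String) (h : xs.Nodup) :
    PySem.Set.ofList xs = xs := by
  rw [PySem.Set.ofList_eq_foldl]
  exact foldl_add_of_nodup xs [] (by simpa using h)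

theorem assert_single_leader_spec' (claims : List (String × Int))
    (hpre : Pre_assert_single_leader claims) :
    assert_single_leader claims = assert_single_leader_alt claims := by
  by_cases hc : claims = []
  · subst hc; rfl
  · obtain ⟨M, hM⟩ : ∃ M, PySem.List.max? (claims.map Prod.snd) (fun t => t) = some M := by
      cases h : PySem.List.max? (claims.map Prod.snd) (fun t => t) with
      | none =>
        have := (PySem.List.max?_eq_none_iff _ _).mp h
        exact absurd (List.map_eq_nil_iff.mp this) hc
      | some M => exact ⟨M, rfl⟩
    have hub : ∀ y ∈ claims.map Prod.snd, y ≤ M := PySem.List.max?_isMax hM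
    have hMm : M ∈ claims.map Prod.snd := PySem.List.max?_mem hM
    have hsub : ((claims.filter (fun q => q.2 == M)).map Prod.fst).Sublist
        (claims.map Prod.fst) := List.Sublist.map _ List.filter_sublist
    have hFnd : ((claims.filter (fun q => q.2 == M)).map Prod.fst).Nodup :=
      List.Nodup.sublist hsub hpre
    have hFne : ((claims.filter (fun q => q.2 == M)).map Prod.fst) ≠ [] := by
      obtain ⟨q, hq, hq2⟩ := List.mem_map.mp hMm
      have : q ∈ claims.filter (fun q => q.2 == M) :=
        List.mem_filter.mpr ⟨hq, by simp [hq2]⟩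
      intro hnil
      rcases List.map_eq_nil_iff.mp hnil with h
      simp [h] at this
    obtain ⟨ld, hld⟩ : ∃ ld, PySem.List.min?
        ((claims.filter (fun q => q.2 == M)).map Prod.fst) (fun x => x) = some ld := by
      cases h : PySem.List.min? ((claims.filter (fun q => q.2 == M)).map Prod.fst)
          (fun x => x) with
      | none => exact absurd ((PySem.List.min?_eq_none_iff _ _).mp h) hFne
      | some ld => exact ⟨ld, rfl⟩
    have hldmem := PySem.List.min?_mem hld
    have hldmin := PySem.List.min?_isMin hld
    have hspec : specState claims
        = some (M, (((claims.filter (fun q => q.2 == M)).map Prod.fst).length : Int), ld) := by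
      simp only [specState, hM, hld]
    unfold assert_single_leader assert_single_leader_alt
    rw [foldl_altStep_eq_specState, hspec]
    simp only [if_neg hc, hM, Option.getD_some,
      ofList_eq_self_of_nodup _ hFnd]
    by_cases h1 : 1 < (claims.filter (fun q => q.2 == M)).length
    · have h1m : 1 < ((claims.filter (fun q => q.2 == M)).map Prod.fst).length := by
        simpa using h1
      have hlen : 1 < PySem.Set.len ((claims.filter (fun q => q.2 == M)).map Prod.fst) := by
        simp only [PySem.Set.len]
        exact_mod_cast h1m
      rw [if_pos hlen]
      have hdec : decide ((((claims.filter (fun q => q.2 == M)).map Prod.fst).length : Int) ≤ 1)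
          = false := by
        simp only [decide_eq_false_iff_not, not_le]
        exact_mod_cast h1m
      rw [hdec]
      have hconv : @PySem.List.sorted String String String.LT' strDecLT
          ((claims.filter (fun q => q.2 == M)).map Prod.fst) (fun x => x) false
          = PySem.List.sorted ((claims.filter (fun q => q.2 == M)).map Prod.fst)
            (fun x => x) false := by congr 1
      rw [hconv]
      cases hs : PySem.List.sorted ((claims.filter (fun q => q.2 == M)).map Prod.fst)
          (fun x => x) with
      | nil => exact absurd ((PySem.List.sorted_eq_nil_iff _ _ _).mp hs) hFne
      | cons m t =>
        have hmmem : m ∈ (claims.filter (fun q => q.2 == M)).map Prod.fst := by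
          rw [← PySem.List.mem_sorted _ (fun x : String => x) false, hs]; simp
        have hmmin := PySem.List.key_head_sorted_le _ (fun x : String => x) hs
        have : ld = m := le_antisymm (hldmin _ hmmem) (hmmin _ hldmem)
        simp [this]
    · have hlem : ((claims.filter (fun q => q.2 == M)).map Prod.fst).length ≤ 1 := by
        rw [List.length_map]
        omega
      have hlen : ¬ 1 < PySem.Set.len ((claims.filter (fun q => q.2 == M)).map Prod.fst) := by
        simp only [PySem.Set.len]
        intro hcon
        have hcon' : 1 < ((claims.filter (fun q => q.2 == M)).map Prod.fst).length := by
          exact_mod_cast hcon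
        omega
      rw [if_neg hlen]
      have hdec : decide ((((claims.filter (fun q => q.2 == M)).map Prod.fst).length : Int) ≤ 1)
          = true := by
        simp only [decide_eq_true_eq]
        exact_mod_cast hlem
      rw [hdec]
      obtain ⟨x, hx⟩ : ∃ x, (claims.filter (fun q => q.2 == M)).map Prod.fst = [x] := by
        have hpos := List.length_pos_iff.mpr hFne
        have hlen1 : ((claims.filter (fun q => q.2 == M)).map Prod.fst).length = 1 := by
          simp only [List.length_map] at hpos ⊢
          omega
        exact List.length_eq_one_iff.mp hlen1
      rw [hx] at hld ⊢
      have : ld = x := by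
        have := PySem.List.min?_mem hld
        simpa using this
      simp [this]

-- ===== VERDICT (by name: the statement is the Claim_ definition above) =====
theorem assert_single_leader_spec : Claim_equal_assert_single_leader := by
  intro claims _ hpre
  exact assert_single_leader_spec' claims hpre
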